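-- pv_equiv track=rewrite | github.com/SkillpTm/Somi-Bot | lib/modules/Get.py | autocomplete_dict_from_search_string
-- ===== SOURCE A (Python) =====
-- def autocomplete_dict_from_search_string(search_string: str, autocomplete_dict: dict) -> dict[str, str]:
--     """Takes a string and a dict and filters for matching results, between the two. The results are sorted form most to least relevant."""
--
--     search_string = search_string.lower()
--     # dict[priority, dict[key, value]]
--     priority_dict: dict[int, dict[str, str]] = {
--         0: {},
--         1: {},
--         2: {},
--         3: {}
--     }
--
--     # the key is what discord will display and the value what is actually behind it:
--     # key: "50 Minutes" value: "50m"
--     for key, value in autocomplete_dict.items():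
--         key, value = str(key), str(value)
--
--         if len(priority_dict) == 25: # discord limits autocomplete suggestions to 25
--             break
--
--         # prority 0: search_string is the beginning of value
--         if value.lower().startswith(search_string):
--             priority_dict[0][key] = value
--             continue
--
--         # prority 1: search_string in the value
--         if search_string in value.lower():
--             priority_dict[1][key] = value
--             continue
--
--         # prority 2: search_string is the beginning of the key
--         if key.lower().startswith(search_string):
--             priority_dict[2][key] = value
--             continue
--
--         # prority 3: search_string in the key
--         if search_string in key.lower():
--             priority_dict[3][key] = value
--             continue
--
--     output: dict[str, str] = {}
--
--     # merge the priority dicts, with higher priority results tkaing precedence over lower priority results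
--     for value in priority_dict.values():
--         output = value | output
--
--     return output
-- ===== SOURCE B (Python) =====
-- def autocomplete_dict_from_search_string(search_string: str, autocomplete_dict: dict) -> dict[str, str]:
--     """Rank each entry once, then emit the entries priority by priority."""
--     search = search_string.lower()
--
--     def rank(key: str, value: str):
--         if value.lower().startswith(search):
--             return 0
--         if search in value.lower():
--             return 1
--         if key.lower().startswith(search):
--             return 2
--         if search in key.lower():
--             return 3
--         return None
--
--     ranked = [(rank(str(k), str(v)), str(k), str(v)) for k, v in autocomplete_dict.items()]
--
--     output: dict[str, str] = {}
--     # lowest priority inserted first so that a later dict(|)-style merge is unnecessary;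
--     # dict equality ignores order, and higher-priority keys are distinct anyway
--     for wanted in (3, 2, 1, 0):
--         for r, k, v in ranked:
--             if r == wanted:
--                 output[k] = v
--     return output
-- ===== Notes on version B (the rewrite author's own statement) =====
-- stated objective: alternative
-- what changed: B computes each entry's match-priority rank once in a single pass and then emits the entries priority by priority, instead of A's four accumulator dicts merged afterwards with reversed dict-union; the dead len(priority_dict)==25 break is dropped.
import Mathlib
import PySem

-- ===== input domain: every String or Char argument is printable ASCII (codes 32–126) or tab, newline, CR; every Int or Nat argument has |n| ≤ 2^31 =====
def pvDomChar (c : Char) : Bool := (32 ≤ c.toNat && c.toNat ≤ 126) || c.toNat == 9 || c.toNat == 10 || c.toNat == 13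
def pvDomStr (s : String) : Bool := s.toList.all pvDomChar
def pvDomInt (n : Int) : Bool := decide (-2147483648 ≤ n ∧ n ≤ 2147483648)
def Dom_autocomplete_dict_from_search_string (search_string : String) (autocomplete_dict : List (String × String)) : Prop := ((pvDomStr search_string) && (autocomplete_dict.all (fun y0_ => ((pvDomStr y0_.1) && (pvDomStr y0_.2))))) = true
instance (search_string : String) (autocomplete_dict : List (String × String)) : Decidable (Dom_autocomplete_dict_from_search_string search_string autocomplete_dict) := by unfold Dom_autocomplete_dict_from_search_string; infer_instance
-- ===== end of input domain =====

-- B ranks each entry once in a single pass and then emits entries priority by priority,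
-- instead of A's four accumulator dicts merged afterwards with reversed dict-union (alternative decomposition, same cost).
-- The Python argument is a dict: both ports read the pair list through PySem.Dict.ofList (Python's dict construction).

-- ===== PORT A =====
-- the loop state: the four priority buckets priority_dict[0], priority_dict[1], priority_dict[2], priority_dict[3]
def pvStA := PySem.Dict String String × PySem.Dict String String × PySem.Dict String String × PySem.Dict String String

-- one iteration of A's loop; the break test `len(priority_dict) == 25` is ported literally:
-- priority_dict always holds exactly the four keys 0,1,2,3, so its length is the length of that key list
def pvBodyA (search : String) (st : pvStA) (kv : String × String) : pvStA :=
  let key := kv.1       -- str(key): identity on str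
  let value := kv.2     -- str(value)
  if ([(0 : Int), 1, 2, 3].length == 25) then st  -- `break`: the condition is constant, so it is never taken and passing st on is exact
  else if PySem.Str.startswith (PySem.Str.lower value) search then (st.1.insert key value, st.2.1, st.2.2.1, st.2.2.2)
  else if PySem.Str.isIn search (PySem.Str.lower value) then (st.1, st.2.1.insert key value, st.2.2.1, st.2.2.2)
  else if PySem.Str.startswith (PySem.Str.lower key) search then (st.1, st.2.1, st.2.2.1.insert key value, st.2.2.2)
  else if PySem.Str.isIn search (PySem.Str.lower key) then (st.1, st.2.1, st.2.2.1, st.2.2.2.insert key value)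
  else st

-- Python dict union a | b: a copy of a updated with b's items
def pvUnion (a b : PySem.Dict String String) : PySem.Dict String String :=
  b.items.foldl (fun d kv => d.insert kv.1 kv.2) a

def autocomplete_dict_from_search_string (search_string : String) (autocomplete_dict : List (String × String)) : List (String × String) :=
  let search := PySem.Str.lower search_string
  let st := (PySem.Dict.ofList autocomplete_dict).items.foldl (pvBodyA search)
    (PySem.Dict.empty, PySem.Dict.empty, PySem.Dict.empty, PySem.Dict.empty)
  -- for value in priority_dict.values(): output = value | output
  let output := [st.1, st.2.1, st.2.2.1, st.2.2.2].foldl (fun output v => pvUnion v output) PySem.Dict.empty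
  output.items

-- ===== PORT B =====
def pvRank (search key value : String) : Option Nat :=
  if PySem.Str.startswith (PySem.Str.lower value) search then some 0
  else if PySem.Str.isIn search (PySem.Str.lower value) then some 1
  else if PySem.Str.startswith (PySem.Str.lower key) search then some 2
  else if PySem.Str.isIn search (PySem.Str.lower key) then some 3
  else none

def autocomplete_dict_from_search_string_alt (search_string : String) (autocomplete_dict : List (String × String)) : List (String × String) :=
  let search := PySem.Str.lower search_string
  let ranked := (PySem.Dict.ofList autocomplete_dict).items.map (fun kv => (pvRank search kv.1 kv.2, kv.1, kv.2))
  let output := ([3, 2, 1, 0] : List Nat).foldl (fun output wanted =>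
      ranked.foldl (fun output t => if t.1 == some wanted then output.insert t.2.1 t.2.2 else output) output)
    PySem.Dict.empty
  output.items

-- ===== PRECONDITION & SPEC =====
def Spec_autocomplete_dict_from_search_string (search_string : String) (autocomplete_dict : List (String × String)) (out : List (String × String)) : Prop := out = autocomplete_dict_from_search_string_alt search_string autocomplete_dict
instance (search_string : String) (autocomplete_dict : List (String × String)) (out : List (String × String)) : Decidable (Spec_autocomplete_dict_from_search_string search_string autocomplete_dict out) := by unfold Spec_autocomplete_dict_from_search_string; infer_instance

-- ===== CLAIM (what is proved, stated in full; the proofs are below) =====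
def Claim_equal_autocomplete_dict_from_search_string : Prop := ∀ (search_string : String) (autocomplete_dict : List (String × String)), Dom_autocomplete_dict_from_search_string search_string autocomplete_dict → Spec_autocomplete_dict_from_search_string search_string autocomplete_dict (autocomplete_dict_from_search_string search_string autocomplete_dict)

-- ===== LEMMAS AND PROOFS =====

-- the bucket of priority r: the entries whose rank is r, in input order
def pvF (search : String) (xs : List (String × String)) (r : Nat) : List (String × String) :=
  xs.filter (fun kv => pvRank search kv.1 kv.2 == some r)

lemma pvRank_cases (search k v : String) :
    pvRank search k v = none ∨ pvRank search k v = some 0 ∨ pvRank search k v = some 1 ∨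
    pvRank search k v = some 2 ∨ pvRank search k v = some 3 := by
  unfold pvRank; split_ifs <;> simp

-- A's loop body, expressed through the rank of the processed entry
lemma pvBodyA_eq (search : String) (st : pvStA) (kv : String × String) :
    pvBodyA search st kv =
      if pvRank search kv.1 kv.2 == some 0 then (st.1.insert kv.1 kv.2, st.2.1, st.2.2.1, st.2.2.2)
      else if pvRank search kv.1 kv.2 == some 1 then (st.1, st.2.1.insert kv.1 kv.2, st.2.2.1, st.2.2.2)
      else if pvRank search kv.1 kv.2 == some 2 then (st.1, st.2.1, st.2.2.1.insert kv.1 kv.2, st.2.2.2)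
      else if pvRank search kv.1 kv.2 == some 3 then (st.1, st.2.1, st.2.2.1, st.2.2.2.insert kv.1 kv.2)
      else st := by
  unfold pvBodyA pvRank
  split_ifs <;> first | rfl | simp_all

lemma pv_contains_false_iff (d : PySem.Dict String String) (k : String) :
    d.contains k = false ↔ ∀ b ∈ d.items, k ≠ b.1 := by
  rw [PySem.Dict.contains_eq_decide_mem_keys]
  constructor
  · intro h b hb hk
    have hmem : k ∈ d.keys := by
      simp only [PySem.Dict.keys, List.mem_map]
      exact ⟨b, hb, hk.symm⟩
    simp [hmem] at h
  · intro h
    simp only [decide_eq_false_iff_not, PySem.Dict.keys, List.mem_map]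
    rintro ⟨b, hb, hbk⟩
    exact h b hb hbk.symm

-- a fold of inserts over fresh distinct keys appends the pairs
lemma pv_stage (d : PySem.Dict String String) (l : List (String × String))
    (hfresh : ∀ a ∈ l, d.contains a.1 = false) (hl : (l.map (fun kv => kv.1)).Nodup) :
    (l.foldl (fun d a => d.insert a.1 a.2) d).items = d.items ++ l := by
  have h := PySem.Dict.items_foldl_insert_fresh l (fun kv => kv.1) (fun kv => kv.2) d hfresh hl
  simpa using h

lemma pvUnion_items (a b : PySem.Dict String String)
    (hfresh : ∀ kv ∈ b.items, a.contains kv.1 = false)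
    (hnd : (b.items.map (fun kv => kv.1)).Nodup) :
    (pvUnion a b).items = a.items ++ b.items := by
  unfold pvUnion
  exact pv_stage a b.items hfresh hnd

-- entries of different priority buckets never share a key (keys are unique and the rank is a function)
lemma pv_disj (search : String) (xs : List (String × String))
    (hnd : (xs.map (fun kv => kv.1)).Nodup) {r r' : Nat} (hrr : r ≠ r') :
    ∀ a ∈ pvF search xs r, ∀ b ∈ pvF search xs r', a.1 ≠ b.1 := by
  intro a ha b hb hab
  simp only [pvF] at ha hb
  have hax := List.mem_of_mem_filter ha
  have hbx := List.mem_of_mem_filter hb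
  have hra := List.of_mem_filter ha
  have hrb := List.of_mem_filter hb
  have hab' : a = b := List.inj_on_of_nodup_map hnd hax hbx hab
  subst hab'
  simp only [beq_iff_eq] at hra hrb
  rw [hra] at hrb
  exact hrr (by simpa using hrb)

lemma pv_disj_keys (search : String) (xs : List (String × String))
    (hnd : (xs.map (fun kv => kv.1)).Nodup) {r r' : Nat} (hrr : r ≠ r') :
    List.Disjoint ((pvF search xs r).map (fun kv => kv.1)) ((pvF search xs r').map (fun kv => kv.1)) := by
  intro k hk hk'
  obtain ⟨a, ha, rfl⟩ := List.mem_map.mp hk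
  obtain ⟨b, hb, hh⟩ := List.mem_map.mp hk'
  exact pv_disj search xs hnd hrr a ha b hb hh.symm

lemma pv_nodup_f (search : String) (xs : List (String × String))
    (hnd : (xs.map (fun kv => kv.1)).Nodup) (r : Nat) :
    ((pvF search xs r).map (fun kv => kv.1)).Nodup := by
  simp only [pvF]
  exact hnd.sublist (List.filter_sublist.map _)

-- invariant of A's loop: each bucket accumulates exactly its priority's entries, in order
lemma pv_loopA (search : String) :
    ∀ (xs : List (String × String)) (st : pvStA),
      (xs.map (fun kv => kv.1)).Nodup →
      (∀ kv ∈ xs, st.1.contains kv.1 = false ∧ st.2.1.contains kv.1 = false ∧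
        st.2.2.1.contains kv.1 = false ∧ st.2.2.2.contains kv.1 = false) →
      (xs.foldl (pvBodyA search) st).1.items = st.1.items ++ pvF search xs 0 ∧
      (xs.foldl (pvBodyA search) st).2.1.items = st.2.1.items ++ pvF search xs 1 ∧
      (xs.foldl (pvBodyA search) st).2.2.1.items = st.2.2.1.items ++ pvF search xs 2 ∧
      (xs.foldl (pvBodyA search) st).2.2.2.items = st.2.2.2.items ++ pvF search xs 3 := by
  intro xs
  induction xs with
  | nil => intro st _ _; simp [pvF]
  | cons kv xs ih =>
    intro st hnd hfresh
    simp only [List.map_cons, List.nodup_cons] at hnd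
    obtain ⟨hkv, hnd'⟩ := hnd
    obtain ⟨h0, h1, h2, h3⟩ := hfresh kv (by simp)
    have hne : ∀ kv' ∈ xs, (kv'.1 == kv.1) = false := by
      intro kv' h'
      simp only [beq_eq_false_iff_ne, ne_eq]
      intro hEq
      exact hkv (hEq ▸ List.mem_map_of_mem h')
    have htail : ∀ kv' ∈ xs, kv' ∈ kv :: xs := fun kv' h' => List.mem_cons_of_mem _ h'
    rcases pvRank_cases search kv.1 kv.2 with hr | hr | hr | hr | hr
    · obtain ⟨i0, i1, i2, i3⟩ := ih st hnd' (fun kv' h' => hfresh kv' (htail kv' h'))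
      refine ⟨?_, ?_, ?_, ?_⟩ <;>
        simp [List.foldl_cons, pvBodyA_eq, hr, i0, i1, i2, i3, pvF]
    · obtain ⟨i0, i1, i2, i3⟩ := ih (st.1.insert kv.1 kv.2, st.2.1, st.2.2.1, st.2.2.2) hnd'
        (by
          intro kv' h'
          obtain ⟨a0, a1, a2, a3⟩ := hfresh kv' (htail kv' h')
          exact ⟨by simp [PySem.Dict.contains_insert, hne kv' h', a0], a1, a2, a3⟩)
      refine ⟨?_, ?_, ?_, ?_⟩ <;>
        simp [List.foldl_cons, pvBodyA_eq, hr, i0, i1, i2, i3, pvF,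
          PySem.Dict.items_insert_of_not_contains st.1 kv.2 h0, List.append_assoc]
    · obtain ⟨i0, i1, i2, i3⟩ := ih (st.1, st.2.1.insert kv.1 kv.2, st.2.2.1, st.2.2.2) hnd'
        (by
          intro kv' h'
          obtain ⟨a0, a1, a2, a3⟩ := hfresh kv' (htail kv' h')
          exact ⟨a0, by simp [PySem.Dict.contains_insert, hne kv' h', a1], a2, a3⟩)
      refine ⟨?_, ?_, ?_, ?_⟩ <;>
        simp [List.foldl_cons, pvBodyA_eq, hr, i0, i1, i2, i3, pvF,
          PySem.Dict.items_insert_of_not_contains st.2.1 kv.2 h1, List.append_assoc]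
    · obtain ⟨i0, i1, i2, i3⟩ := ih (st.1, st.2.1, st.2.2.1.insert kv.1 kv.2, st.2.2.2) hnd'
        (by
          intro kv' h'
          obtain ⟨a0, a1, a2, a3⟩ := hfresh kv' (htail kv' h')
          exact ⟨a0, a1, by simp [PySem.Dict.contains_insert, hne kv' h', a2], a3⟩)
      refine ⟨?_, ?_, ?_, ?_⟩ <;>
        simp [List.foldl_cons, pvBodyA_eq, hr, i0, i1, i2, i3, pvF,
          PySem.Dict.items_insert_of_not_contains st.2.2.1 kv.2 h2, List.append_assoc]
    · obtain ⟨i0, i1, i2, i3⟩ := ih (st.1, st.2.1, st.2.2.1, st.2.2.2.insert kv.1 kv.2) hnd'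
        (by
          intro kv' h'
          obtain ⟨a0, a1, a2, a3⟩ := hfresh kv' (htail kv' h')
          exact ⟨a0, a1, a2, by simp [PySem.Dict.contains_insert, hne kv' h', a3]⟩)
      refine ⟨?_, ?_, ?_, ?_⟩ <;>
        simp [List.foldl_cons, pvBodyA_eq, hr, i0, i1, i2, i3, pvF,
          PySem.Dict.items_insert_of_not_contains st.2.2.2 kv.2 h3, List.append_assoc]

-- A's result: the buckets concatenated from priority 3 down to 0
lemma pvA_items (search_string : String) (autocomplete_dict : List (String × String)) :
    autocomplete_dict_from_search_string search_string autocomplete_dict =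
      pvF (PySem.Str.lower search_string) (PySem.Dict.ofList autocomplete_dict).items 3 ++
      (pvF (PySem.Str.lower search_string) (PySem.Dict.ofList autocomplete_dict).items 2 ++
      (pvF (PySem.Str.lower search_string) (PySem.Dict.ofList autocomplete_dict).items 1 ++
       pvF (PySem.Str.lower search_string) (PySem.Dict.ofList autocomplete_dict).items 0)) := by
  simp only [autocomplete_dict_from_search_string]
  set search := PySem.Str.lower search_string with hsearch
  set xs := (PySem.Dict.ofList autocomplete_dict).items with hxs
  have hnd : (xs.map (fun kv => kv.1)).Nodup := by
    have h := PySem.Dict.nodup_keys_ofList (κ := String) (ν := String) autocomplete_dict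
    simpa [PySem.Dict.keys, hxs] using h
  set st := xs.foldl (pvBodyA search)
    (PySem.Dict.empty, PySem.Dict.empty, PySem.Dict.empty, PySem.Dict.empty) with hst
  obtain ⟨hp0, hp1, hp2, hp3⟩ := pv_loopA search xs
    (PySem.Dict.empty, PySem.Dict.empty, PySem.Dict.empty, PySem.Dict.empty)
    hnd (by intro kv _; simp [PySem.Dict.contains_empty])
  have hemp : (PySem.Dict.empty : PySem.Dict String String).items = [] := rfl
  rw [hemp] at hp0 hp1 hp2 hp3
  simp only [List.nil_append] at hp0 hp1 hp2 hp3
  simp only [List.foldl_cons, List.foldl_nil]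
  rw [show pvUnion st.1 PySem.Dict.empty = st.1 from rfl]
  have hi1 : (pvUnion st.2.1 st.1).items = pvF search xs 1 ++ pvF search xs 0 := by
    have hfr : ∀ kv ∈ st.1.items, st.2.1.contains kv.1 = false := by
      intro kv hkv
      rw [hp0] at hkv
      refine (pv_contains_false_iff st.2.1 kv.1).mpr ?_
      intro b hb
      rw [hp1] at hb
      exact pv_disj search xs hnd (by decide : (0 : Nat) ≠ 1) kv hkv b hb
    have hn : (st.1.items.map (fun kv => kv.1)).Nodup := by
      rw [hp0]; exact pv_nodup_f search xs hnd 0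
    rw [pvUnion_items st.2.1 st.1 hfr hn, hp1, hp0]
  have hi2 : (pvUnion st.2.2.1 (pvUnion st.2.1 st.1)).items =
      pvF search xs 2 ++ (pvF search xs 1 ++ pvF search xs 0) := by
    have hfr : ∀ kv ∈ (pvUnion st.2.1 st.1).items, st.2.2.1.contains kv.1 = false := by
      intro kv hkv
      rw [hi1] at hkv
      refine (pv_contains_false_iff st.2.2.1 kv.1).mpr ?_
      intro b hb
      rw [hp2] at hb
      rcases List.mem_append.mp hkv with h | h
      · exact pv_disj search xs hnd (by decide : (1 : Nat) ≠ 2) kv h b hb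
      · exact pv_disj search xs hnd (by decide : (0 : Nat) ≠ 2) kv h b hb
    have hn : ((pvUnion st.2.1 st.1).items.map (fun kv => kv.1)).Nodup := by
      rw [hi1]
      simp only [List.map_append]
      exact (pv_nodup_f search xs hnd 1).append (pv_nodup_f search xs hnd 0)
        (pv_disj_keys search xs hnd (by decide))
    rw [pvUnion_items _ _ hfr hn, hp2, hi1]
  have hfr3 : ∀ kv ∈ (pvUnion st.2.2.1 (pvUnion st.2.1 st.1)).items,
      st.2.2.2.contains kv.1 = false := by
    intro kv hkv
    rw [hi2] at hkv
    refine (pv_contains_false_iff st.2.2.2 kv.1).mpr ?_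
    intro b hb
    rw [hp3] at hb
    rcases List.mem_append.mp hkv with h | h
    · exact pv_disj search xs hnd (by decide : (2 : Nat) ≠ 3) kv h b hb
    · rcases List.mem_append.mp h with h' | h'
      · exact pv_disj search xs hnd (by decide : (1 : Nat) ≠ 3) kv h' b hb
      · exact pv_disj search xs hnd (by decide : (0 : Nat) ≠ 3) kv h' b hb
  have hn3 : ((pvUnion st.2.2.1 (pvUnion st.2.1 st.1)).items.map (fun kv => kv.1)).Nodup := by
    rw [hi2]
    simp only [List.map_append]
    refine (pv_nodup_f search xs hnd 2).append ?_ ?_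
    · exact (pv_nodup_f search xs hnd 1).append (pv_nodup_f search xs hnd 0)
        (pv_disj_keys search xs hnd (by decide))
    · rw [List.disjoint_append_right]
      exact ⟨pv_disj_keys search xs hnd (by decide), pv_disj_keys search xs hnd (by decide)⟩
  rw [pvUnion_items _ _ hfr3 hn3, hp3, hi2]

-- B's outer loop over the priority list appends the buckets in that order
lemma pvB_fold (search : String) (xs : List (String × String))
    (hnd : (xs.map (fun kv => kv.1)).Nodup) :
    ∀ (ws : List Nat) (out : PySem.Dict String String), ws.Nodup →
      (∀ w ∈ ws, ∀ a ∈ pvF search xs w, out.contains a.1 = false) →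
      (ws.foldl (fun output wanted =>
          (xs.map (fun kv => (pvRank search kv.1 kv.2, kv.1, kv.2))).foldl
            (fun output t => if t.1 == some wanted then output.insert t.2.1 t.2.2 else output)
            output)
        out).items = out.items ++ (ws.map (fun w => pvF search xs w)).flatten := by
  intro ws
  induction ws with
  | nil => intro out _ _; simp
  | cons w ws ih =>
    intro out hw hfresh
    obtain ⟨hwmem, hw'⟩ := List.nodup_cons.mp hw
    simp only [List.foldl_cons, List.map_cons, List.flatten_cons]
    have hstage : ((xs.map (fun kv => (pvRank search kv.1 kv.2, kv.1, kv.2))).foldl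
        (fun output t => if t.1 == some w then output.insert t.2.1 t.2.2 else output)
        out).items = out.items ++ pvF search xs w := by
      rw [← List.foldl_filter, List.filter_map, List.foldl_map]
      exact pv_stage out _ (hfresh w (by simp)) (pv_nodup_f search xs hnd w)
    have hfr' : ∀ w' ∈ ws, ∀ a ∈ pvF search xs w',
        ((xs.map (fun kv => (pvRank search kv.1 kv.2, kv.1, kv.2))).foldl
          (fun output t => if t.1 == some w then output.insert t.2.1 t.2.2 else output)
          out).contains a.1 = false := by
      intro w' hw'' a ha
      refine (pv_contains_false_iff _ a.1).mpr ?_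
      intro b hb hk
      rw [hstage] at hb
      rcases List.mem_append.mp hb with h | h
      · exact ((pv_contains_false_iff out a.1).mp
          (hfresh w' (List.mem_cons_of_mem _ hw'') a ha)) b h hk
      · exact pv_disj search xs hnd (by rintro rfl; exact hwmem hw'') a ha b h hk
    rw [ih _ hw' hfr', hstage, List.append_assoc]

lemma pvB_items (search_string : String) (autocomplete_dict : List (String × String)) :
    autocomplete_dict_from_search_string_alt search_string autocomplete_dict =
      (([3, 2, 1, 0] : List Nat).map
        (fun w => pvF (PySem.Str.lower search_string) (PySem.Dict.ofList autocomplete_dict).items w)).flatten := by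
  simp only [autocomplete_dict_from_search_string_alt]
  have hnd : (((PySem.Dict.ofList autocomplete_dict).items).map (fun kv => kv.1)).Nodup := by
    have h := PySem.Dict.nodup_keys_ofList (κ := String) (ν := String) autocomplete_dict
    simpa [PySem.Dict.keys] using h
  rw [pvB_fold (PySem.Str.lower search_string) (PySem.Dict.ofList autocomplete_dict).items hnd
    [3, 2, 1, 0] PySem.Dict.empty (by decide)
    (fun w _ a _ => PySem.Dict.contains_empty a.1)]
  rfl

-- ===== VERDICT (by name: the statement is the Claim_ definition above) =====
theorem autocomplete_dict_from_search_string_spec : Claim_equal_autocomplete_dict_from_search_string := by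
  intro search_string autocomplete_dict _
  unfold Spec_autocomplete_dict_from_search_string
  rw [pvA_items, pvB_items]
  simp
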